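-- pv_equiv track=rewrite | github.com/r0ny123/mcrit-plugin | widgets/FunctionOverviewWidget.py | _calculateLabelCriticality
-- ===== SOURCE A (Python) =====
-- def _calculateLabelCriticality(label_list, has_function_name=False, is_resolved=False):
--     criticality = 0
--     if len(label_list) == 0:
--         return criticality
--     if has_function_name:
--         criticality = 1
--         return criticality
--     if is_resolved:
--         criticality = 2
--         return criticality
--     criticality = 3
--     label_set = set([label_entry[1] for label_entry in label_list])
--     top_score = max([label_entry[0] for label_entry in label_list])
--     top_score_label_pool = [
--         label_entry for label_entry in label_list if label_entry[0] == top_score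
--     ]
--     if len(label_set) > 1:
--         criticality += 1
--         if len(set([label_entry[1] for label_entry in top_score_label_pool])) > 1:
--             criticality += 1
--     return criticality
-- ===== SOURCE B (Python) =====
-- def _calculateLabelCriticality(label_list, has_function_name=False, is_resolved=False):
--     if len(label_list) == 0:
--         return 0
--     if has_function_name:
--         return 1
--     if is_resolved:
--         return 2
--     all_labels = set()
--     top_score = None
--     top_labels = set()
--     for entry in label_list:
--         all_labels.add(entry[1])
--         if top_score is None or entry[0] > top_score:
--             top_score = entry[0]
--             top_labels = {entry[1]}
--         elif entry[0] == top_score: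
--             top_labels.add(entry[1])
--     criticality = 3
--     if len(all_labels) > 1:
--         criticality += 1
--         if len(top_labels) > 1:
--             criticality += 1
--     return criticality
-- ===== Notes on version B (the rewrite author's own statement) =====
-- stated objective: alternative
-- what changed: Replaces A's four separate passes (label-set comprehension, max over scores, filter to the top-score pool, set of pool labels) by one streaming loop that maintains the label set, a running top score that resets the top-label set when beaten, and the top-label set.
import Mathlib
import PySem

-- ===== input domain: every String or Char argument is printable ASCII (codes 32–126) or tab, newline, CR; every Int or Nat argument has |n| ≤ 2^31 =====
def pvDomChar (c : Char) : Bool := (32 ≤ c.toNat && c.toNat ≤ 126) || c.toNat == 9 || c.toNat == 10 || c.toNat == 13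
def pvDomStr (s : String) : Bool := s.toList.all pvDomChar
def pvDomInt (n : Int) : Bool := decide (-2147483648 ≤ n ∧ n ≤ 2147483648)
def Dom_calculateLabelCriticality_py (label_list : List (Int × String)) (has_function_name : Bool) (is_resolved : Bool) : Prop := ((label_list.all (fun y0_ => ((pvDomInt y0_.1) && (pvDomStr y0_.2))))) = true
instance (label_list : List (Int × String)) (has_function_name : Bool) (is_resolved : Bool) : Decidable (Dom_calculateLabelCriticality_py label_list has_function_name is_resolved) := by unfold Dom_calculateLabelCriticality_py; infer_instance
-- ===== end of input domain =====

-- B replaces A's four passes (label set, max, top-score filter, pool set) by one streaming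
-- loop maintaining the label set, a running top score and the top-label set (alternative decomposition, same O(n) cost).


-- ===== PORT A =====
def calculateLabelCriticality_py (label_list : List (Int × String)) (has_function_name : Bool) (is_resolved : Bool) : Int :=
  if label_list.length = 0 then 0
  else if has_function_name then 1
  else if is_resolved then 2
  else
    let label_set : PySem.Set String := PySem.Set.ofList (label_list.map (fun e => e.2))
    let top_score : Int :=
      match PySem.List.max? (label_list.map (fun e => e.1)) (fun y => y) with
      | some t => t
      | none => 0   -- unreachable: label_list is non-empty in this branch
    let top_score_label_pool := label_list.filter (fun e => e.1 == top_score)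
    let criticality : Int := 3
    if label_set.length > 1 then
      let criticality := criticality + 1
      if (PySem.Set.ofList (top_score_label_pool.map (fun e => e.2))).length > 1 then
        criticality + 1
      else criticality
    else criticality

-- ===== PORT B =====
-- one streaming step: add the label to all_labels, update running top score / top-label set
def pvStepB (st : PySem.Set String × Option Int × PySem.Set String) (e : Int × String) :
    PySem.Set String × Option Int × PySem.Set String :=
  let all := PySem.Set.add st.1 e.2
  match st.2.1 with
  | none => (all, some e.1, PySem.Set.ofList [e.2])
  | some t =>
    if e.1 > t then (all, some e.1, PySem.Set.ofList [e.2])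
    else if e.1 == t then (all, some t, PySem.Set.add st.2.2 e.2)
    else (all, some t, st.2.2)

def calculateLabelCriticality_py_alt (label_list : List (Int × String)) (has_function_name : Bool) (is_resolved : Bool) : Int :=
  if label_list.length = 0 then 0
  else if has_function_name then 1
  else if is_resolved then 2
  else
    let st := label_list.foldl pvStepB (PySem.Set.empty, none, PySem.Set.empty)
    let criticality : Int := 3
    if st.1.length > 1 then
      let criticality := criticality + 1
      if st.2.2.length > 1 then criticality + 1 else criticality
    else criticality

-- ===== PRECONDITION & SPEC =====
def Spec_calculateLabelCriticality_py (label_list : List (Int × String)) (has_function_name : Bool) (is_resolved : Bool) (out : Int) : Prop := out = calculateLabelCriticality_py_alt label_list has_function_name is_resolved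
instance (label_list : List (Int × String)) (has_function_name : Bool) (is_resolved : Bool) (out : Int) : Decidable (Spec_calculateLabelCriticality_py label_list has_function_name is_resolved out) := by unfold Spec_calculateLabelCriticality_py; infer_instance

-- ===== CLAIM (what is proved, stated in full; the proofs are below) =====
def Claim_equal_calculateLabelCriticality_py : Prop := ∀ (label_list : List (Int × String)) (has_function_name : Bool) (is_resolved : Bool), Dom_calculateLabelCriticality_py label_list has_function_name is_resolved → Spec_calculateLabelCriticality_py label_list has_function_name is_resolved (calculateLabelCriticality_py label_list has_function_name is_resolved)

-- ===== LEMMAS AND PROOFS =====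

theorem pv_le_foldl_max (t : List (Int × String)) (m : Int) :
    m ≤ t.foldl (fun a e => max a e.1) m := by
  induction t generalizing m with
  | nil => simp
  | cons e t ih => exact le_trans (le_max_left m e.1) (ih _)

-- invariant of B's streaming fold once the running max is initialised
theorem pv_fold_inv (l : List (Int × String)) (s p : PySem.Set String) (m : Int) :
    l.foldl pvStepB (s, some m, p) =
      ( l.foldl (fun q e => PySem.Set.add q e.2) s,
        some (l.foldl (fun a e => max a e.1) m),
        if l.foldl (fun a e => max a e.1) m = m
        then (l.filter (fun e => e.1 == m)).foldl (fun q e => PySem.Set.add q e.2) p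
        else PySem.Set.ofList
          ((l.filter (fun e => e.1 == l.foldl (fun a e => max a e.1) m)).map Prod.snd) ) := by
  induction l generalizing s p m with
  | nil => simp
  | cons e t ih =>
    rcases lt_trichotomy m e.1 with h | h | h
    · -- new strict max: reset
      have hstep : pvStepB (s, some m, p) e
          = (PySem.Set.add s e.2, some e.1, PySem.Set.ofList [e.2]) := by
        simp [pvStepB, h]
      have hmax : max m e.1 = e.1 := max_eq_right h.le
      have hge : e.1 ≤ t.foldl (fun a e => max a e.1) e.1 := pv_le_foldl_max t e.1
      have hne : ¬ t.foldl (fun a e => max a e.1) e.1 = m := by omega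
      have hem : ¬ e.1 = m := by omega
      simp only [List.foldl_cons, hstep, ih, hmax, List.filter_cons]
      by_cases h2 : t.foldl (fun a e => max a e.1) e.1 = e.1
      · simp [h2, hem, PySem.Set.ofList_eq_foldl, List.foldl_map]
      · have hne2 : (e.1 == t.foldl (fun a e => max a e.1) e.1) = false := by
          simp only [beq_eq_false_iff_ne, ne_eq]
          exact fun hc => h2 hc.symm
        simp [h2, hne, hne2]
    · -- equal: add to top-label set
      subst h
      have hstep : pvStepB (s, some e.1, p) e
          = (PySem.Set.add s e.2, some e.1, PySem.Set.add p e.2) := by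
        simp [pvStepB]
      simp only [List.foldl_cons, hstep, ih, max_self, List.filter_cons]
      by_cases h2 : t.foldl (fun a e => max a e.1) e.1 = e.1
      · simp [h2]
      · have hgt : e.1 < t.foldl (fun a e => max a e.1) e.1 :=
          lt_of_le_of_ne (pv_le_foldl_max t e.1) (fun hc => h2 hc.symm)
        have hne2 : (e.1 == t.foldl (fun a e => max a e.1) e.1) = false := by
          simp only [beq_eq_false_iff_ne, ne_eq]; omega
        simp [h2, hne2]
    · -- smaller: state unchanged except all_labels
      have hstep : pvStepB (s, some m, p) e
          = (PySem.Set.add s e.2, some m, p) := by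
        have h1 : ¬ e.1 > m := by omega
        have h2 : (e.1 == m) = false := by simp only [beq_eq_false_iff_ne, ne_eq]; omega
        simp [pvStepB, h1, h2]
      have hmax : max m e.1 = m := by omega
      have hge : m ≤ t.foldl (fun a e => max a e.1) m := pv_le_foldl_max t m
      have hne1 : (e.1 == m) = false := by simp only [beq_eq_false_iff_ne, ne_eq]; omega
      have hne2 : (e.1 == t.foldl (fun a e => max a e.1) m) = false := by
        simp only [beq_eq_false_iff_ne, ne_eq]; omega
      simp only [List.foldl_cons, hstep, ih, hmax, List.filter_cons]
      by_cases h2 : t.foldl (fun a e => max a e.1) m = m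
      · simp [h2, hne1]
      · simp [h2, hne2]

-- ===== VERDICT (by name: the statement is the Claim_ definition above) =====
theorem calculateLabelCriticality_py_spec : Claim_equal_calculateLabelCriticality_py := by
  intro label_list has_function_name is_resolved _
  unfold Spec_calculateLabelCriticality_py calculateLabelCriticality_py calculateLabelCriticality_py_alt
  cases label_list with
  | nil => simp
  | cons x t =>
    have hlen : ¬ ((x :: t).length = 0) := by simp
    rw [if_neg hlen, if_neg hlen]
    cases has_function_name with
    | true => simp
    | false =>
      cases is_resolved with
      | true => simp
      | false =>
        simp only [Bool.false_eq_true, if_false]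
        -- first step of B's fold initialises the running state
        have hfirst : pvStepB (PySem.Set.empty, none, PySem.Set.empty) x
            = (PySem.Set.ofList [x.2], some x.1, PySem.Set.ofList [x.2]) := by
          simp [pvStepB, PySem.Set.empty, PySem.Set.add, PySem.Set.ofList]
        have hM : PySem.List.max? ((x :: t).map (fun e => e.1)) (fun y => y)
            = some (t.foldl (fun a e => max a e.1) x.1) := by
          rw [List.map_cons, PySem.List.max?_id_cons, List.foldl_map]
        rw [List.foldl_cons, hfirst, pv_fold_inv, hM]
        by_cases h2 : t.foldl (fun a e => max a e.1) x.1 = x.1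
        · simp [h2, PySem.Set.ofList_eq_foldl, List.foldl_map]
        · have hgt : x.1 < t.foldl (fun a e => max a e.1) x.1 :=
            lt_of_le_of_ne (pv_le_foldl_max t x.1) (fun hc => h2 hc.symm)
          have hne : (x.1 == t.foldl (fun a e => max a e.1) x.1) = false := by
            simp only [beq_eq_false_iff_ne, ne_eq]; omega
          simp [h2, hne, PySem.Set.ofList_eq_foldl, List.foldl_map]
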